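-- pv_equiv track=rewrite | github.com/Sthyao/data_and_feature | Monthly _sales_weight/data_con.py | time_series
-- ===== SOURCE A (Python) =====
-- def time_series(year,count_num):
--     data_list = []
--     count1 = 0
--     temp = year*100 + 1
--     while(count1 < count_num):
--         for i in range(12):
--             data_list.append(str(temp)[:4] + '-' + str(temp)[4:])
--             temp += 1
--         temp += 100 - 12
--         count1 += 12
--     return data_list
-- ===== SOURCE B (Python) =====
-- def time_series(year, count_num):
--     # Flat index-driven loop: derive each entry independently from its index k,
--     # instead of A's nested while/for with a running temp and +88 correction.
--     total = 12 * ((count_num + 11) // 12) if count_num > 0 else 0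
--     return [_fmt((year + k // 12) * 100 + k % 12 + 1) for k in range(total)]
--
-- def _fmt(t):
--     s = str(t)
--     return s[:4] + '-' + s[4:]
-- ===== Notes on version B (the rewrite author's own statement) =====
-- stated objective: alternative
-- what changed: Replaces the nested while/for loop with its running temp accumulator and +88 block correction by a single flat comprehension over range(12*ceil(count_num/12)) that derives each entry independently as (year + k//12)*100 + k%12 + 1.
import Mathlib
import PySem

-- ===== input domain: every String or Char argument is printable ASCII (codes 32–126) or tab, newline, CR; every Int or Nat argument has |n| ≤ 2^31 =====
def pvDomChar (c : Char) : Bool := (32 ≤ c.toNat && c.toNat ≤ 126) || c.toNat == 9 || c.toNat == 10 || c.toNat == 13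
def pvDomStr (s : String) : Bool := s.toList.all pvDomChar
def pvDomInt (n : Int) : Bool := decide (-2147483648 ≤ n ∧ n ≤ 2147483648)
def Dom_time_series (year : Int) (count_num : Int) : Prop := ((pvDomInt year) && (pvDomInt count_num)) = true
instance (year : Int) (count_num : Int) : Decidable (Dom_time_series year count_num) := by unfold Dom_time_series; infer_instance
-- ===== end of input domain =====

-- B replaces A's nested while/for with a running temp and +88 correction by one flat
-- index loop deriving each entry independently (objective: alternative decomposition).

-- ===== PORT A =====
-- str(temp)[:4] + '-' + str(temp)[4:]
def tsFmtA (temp : Int) : String :=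
  PySem.Str.slice (PySem.Int.toStr temp) none (some 4) ++ "-" ++
    PySem.Str.slice (PySem.Int.toStr temp) (some 4) none

-- body of the inner 'for i in range(12)': append the formatted temp, temp += 1
def tsInner (st : List String × Int) (_i : Int) : List String × Int :=
  (st.1 ++ [tsFmtA st.2], st.2 + 1)

-- the outer 'while count1 < count_num' loop
def tsLoop (count_num : Int) (data_list : List String) (count1 temp : Int) : List String :=
  if count1 < count_num then
    let st := (PySem.List.pyRange 0 12 1).foldl tsInner (data_list, temp)
    tsLoop count_num st.1 (count1 + 12) (st.2 + (100 - 12))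
  else data_list
termination_by (count_num - count1).toNat
decreasing_by omega

def time_series (year : Int) (count_num : Int) : List String :=
  tsLoop count_num [] 0 (year * 100 + 1)

-- ===== PORT B =====
def tsFmtB (t : Int) : String :=
  PySem.Str.slice (PySem.Int.toStr t) none (some 4) ++ "-" ++
    PySem.Str.slice (PySem.Int.toStr t) (some 4) none

def time_series_alt (year : Int) (count_num : Int) : List String :=
  let total : Int := if count_num > 0 then 12 * (PySem.Int.floordiv (count_num + 11) 12) else 0
  (PySem.List.pyRange 0 total 1).map
    (fun k => tsFmtB ((year + PySem.Int.floordiv k 12) * 100 + PySem.Int.mod k 12 + 1))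

-- ===== PRECONDITION & SPEC =====
def Spec_time_series (year : Int) (count_num : Int) (out : List String) : Prop := out = time_series_alt year count_num
instance (year : Int) (count_num : Int) (out : List String) : Decidable (Spec_time_series year count_num out) := by unfold Spec_time_series; infer_instance

-- ===== CLAIM (what is proved, stated in full; the proofs are below) =====
def Claim_equal_time_series : Prop := ∀ (year : Int) (count_num : Int), Dom_time_series year count_num → Spec_time_series year count_num (time_series year count_num)

-- ===== LEMMAS AND PROOFS =====

-- one block of 12 months starting at year y
def tsBlock (y : Int) : List String :=
  [tsFmtA (y * 100 + 1), tsFmtA (y * 100 + 2), tsFmtA (y * 100 + 3), tsFmtA (y * 100 + 4),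
   tsFmtA (y * 100 + 5), tsFmtA (y * 100 + 6), tsFmtA (y * 100 + 7), tsFmtA (y * 100 + 8),
   tsFmtA (y * 100 + 9), tsFmtA (y * 100 + 10), tsFmtA (y * 100 + 11), tsFmtA (y * 100 + 12)]

-- n consecutive blocks starting at year y
def tsBlocks (y : Int) : Nat → List String
  | 0 => []
  | n + 1 => tsBlock y ++ tsBlocks (y + 1) n

theorem tsInner_fold (data : List String) (y : Int) :
    (PySem.List.pyRange 0 12 1).foldl tsInner (data, y * 100 + 1)
      = (data ++ tsBlock y, y * 100 + 13) := by
  have h : PySem.List.pyRange 0 12 1 = [0,1,2,3,4,5,6,7,8,9,10,11] := by decide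
  rw [h]
  simp only [List.foldl, tsInner, tsBlock]
  ring_nf
  simp [List.append_assoc]

theorem tsLoop_eq (n : Nat) : ∀ (cn c1 y : Int) (data : List String),
    cn - c1 ≤ 12 * n → (n = 0 ∨ 12 * n - 12 < cn - c1) →
    tsLoop cn data c1 (y * 100 + 1) = data ++ tsBlocks y n := by
  induction n with
  | zero =>
    intro cn c1 y data h1 _
    rw [tsLoop]
    simp only [tsBlocks, List.append_nil]
    rw [if_neg (by omega)]
  | succ n ih =>
    intro cn c1 y data h1 h2
    rw [tsLoop, if_pos (by omega)]
    simp only [tsInner_fold]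
    have harg : y * 100 + 13 + (100 - 12) = (y + 1) * 100 + 1 := by ring
    rw [harg, ih cn (c1 + 12) (y + 1) (data ++ tsBlock y) (by omega) (by omega)]
    simp [tsBlocks]

theorem tsAlt_map (n : Nat) : ∀ (y : Int),
    (List.map (fun k => tsFmtB ((y + PySem.Int.floordiv k 12) * 100 + PySem.Int.mod k 12 + 1))
      (List.map (fun k : Nat => (k : Int)) (List.range (12 * n))))
      = tsBlocks y n := by
  induction n with
  | zero => intro y; simp [tsBlocks]
  | succ n ih =>
    intro y
    have h12 : 12 * (n + 1) = 12 + 12 * n := by ring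
    rw [h12, List.range_add, List.map_append, List.map_append]
    have hfirst :
        (List.map (fun k => tsFmtB ((y + PySem.Int.floordiv k 12) * 100 + PySem.Int.mod k 12 + 1))
          (List.map (fun k : Nat => (k : Int)) (List.range 12))) = tsBlock y := by
      have h : List.range 12 = [0,1,2,3,4,5,6,7,8,9,10,11] := by decide
      rw [h]
      simp only [List.map_cons, List.map_nil, tsBlock, tsFmtB, tsFmtA]
      norm_num [PySem.Int.floordiv_natCast, PySem.Int.mod_natCast]
      ring_nf
      simp
    have hrest :
        (List.map (fun k => tsFmtB ((y + PySem.Int.floordiv k 12) * 100 + PySem.Int.mod k 12 + 1))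
          (List.map (fun k : Nat => (k : Int)) (List.map (fun k => 12 + k) (List.range (12 * n)))))
          = tsBlocks (y + 1) n := by
      rw [← ih (y + 1)]
      simp only [List.map_map]
      apply List.map_congr_left
      intro k _
      simp only [Function.comp]
      have hd : PySem.Int.floordiv ((12 + k : Nat) : Int) 12 = PySem.Int.floordiv ((k : Nat) : Int) 12 + 1 := by
        rw [PySem.Int.floordiv_eq_ediv_of_pos (by norm_num), PySem.Int.floordiv_eq_ediv_of_pos (by norm_num)]
        omega
      have hm : PySem.Int.mod ((12 + k : Nat) : Int) 12 = PySem.Int.mod ((k : Nat) : Int) 12 := by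
        rw [PySem.Int.mod_eq_emod_of_pos (by norm_num), PySem.Int.mod_eq_emod_of_pos (by norm_num)]
        omega
      push_cast at hd hm ⊢
      rw [hd, hm]
      ring_nf
    rw [hfirst, hrest, tsBlocks]

-- ===== VERDICT (by name: the statement is the Claim_ definition above) =====
theorem time_series_spec : Claim_equal_time_series := by
  intro year cn _
  unfold Spec_time_series time_series time_series_alt
  -- the number of 12-blocks both programs produce
  set n : Nat := (cn.toNat + 11) / 12 with hn
  have hdm := Nat.div_add_mod (cn.toNat + 11) 12
  have hml : (cn.toNat + 11) % 12 < 12 := Nat.mod_lt _ (by omega)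
  have hb1 : cn - 0 ≤ 12 * n := by omega
  have hb2 : n = 0 ∨ 12 * (n : Int) - 12 < cn - 0 := by omega
  rw [tsLoop_eq n cn 0 year [] hb1 hb2]
  by_cases hc : cn > 0
  · rw [if_pos hc]
    have hfd : PySem.Int.floordiv (cn + 11) 12 = (n : Int) := by
      rw [PySem.Int.floordiv_eq_iff_of_pos (by omega)]
      constructor <;> omega
    rw [hfd]
    have : (12 : Int) * (n : Int) = ((12 * n : Nat) : Int) := by push_cast; ring
    rw [this]
    simp only [PySem.List.pyRange_zero_natCast, tsAlt_map, List.nil_append]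
  · rw [if_neg hc]
    have hn0 : n = 0 := by omega
    rw [hn0]
    simp [tsBlocks]
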